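-- pv_equiv track=rewrite | github.com/SACGF/variantgrid | library/utils.py | pretty_label
-- ===== SOURCE A (Python) =====
-- def pretty_label(label: str):
--     label = label.replace('_', ' ')
--     tidied = ''
--     last_space = True
--     for char in label:
--         if last_space:
--             char = char.upper()
--             last_space = False
--         if char == ' ':
--             last_space = True
--         tidied = tidied + char
--     return tidied
-- ===== SOURCE B (Python) =====
-- def pretty_label(label: str):
--     s = label.replace('_', ' ')
--     return ' '.join(w[:1].upper() + w[1:] for w in s.split(' '))
-- ===== Notes on version B (the rewrite author's own statement) =====
-- stated objective: idiomatic
-- what changed: Replaced the character-by-character last_space state machine (which grows the result one character at a time) with a word-oriented pass: split on the space separator, uppercase each token's first character by slicing, and rejoin, preserving empty tokens exactly.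
import Mathlib
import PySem

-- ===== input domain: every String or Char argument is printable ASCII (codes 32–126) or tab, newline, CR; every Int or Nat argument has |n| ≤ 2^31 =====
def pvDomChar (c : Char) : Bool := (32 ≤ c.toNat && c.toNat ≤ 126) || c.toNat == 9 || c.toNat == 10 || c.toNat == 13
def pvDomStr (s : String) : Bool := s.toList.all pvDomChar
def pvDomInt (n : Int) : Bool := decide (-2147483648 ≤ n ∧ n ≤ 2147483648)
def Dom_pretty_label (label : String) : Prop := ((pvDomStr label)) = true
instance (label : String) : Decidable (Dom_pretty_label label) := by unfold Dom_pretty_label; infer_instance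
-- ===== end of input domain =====

-- B replaces A's character-by-character last_space state machine with a word-oriented
-- split-on-space / capitalize-first-char / rejoin pass (objective: idiomatic).

-- ===== PORT A =====
-- A: label.replace('_',' '), then a fold over the characters carrying (tidied, last_space).
def pretty_label (label : String) : String :=
  let label2 := PySem.Chars.replace label.toList ['_'] [' ']
  String.ofList (label2.foldl (fun (st : List Char × Bool) char =>
    let c2 := if st.2 then PySem.Chars.upperChar char else char
    let ls2 := if st.2 then false else st.2
    let ls3 := if c2 = ' ' then true else ls2
    (st.1 ++ [c2], ls3)) (([] : List Char), true)).1

-- ===== PORT B =====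
-- w[:1].upper() + w[1:]
def pvCapWord (w : List Char) : List Char :=
  PySem.Chars.upper (PySem.Chars.slice w none (some 1)) ++ PySem.Chars.slice w (some 1) none

-- B: s = label.replace('_',' '); ' '.join(capitalized tokens of s.split(' '))
def pretty_label_alt (label : String) : String :=
  let s := PySem.Chars.replace label.toList ['_'] [' ']
  String.ofList (PySem.Chars.join [' '] ((PySem.Chars.splitOn s [' ']).map pvCapWord))

-- ===== PRECONDITION & SPEC =====
def Spec_pretty_label (label : String) (out : String) : Prop := out = pretty_label_alt label
instance (label : String) (out : String) : Decidable (Spec_pretty_label label out) := by unfold Spec_pretty_label; infer_instance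

-- ===== CLAIM (what is proved, stated in full; the proofs are below) =====
def Claim_equal_pretty_label : Prop := ∀ (label : String), Dom_pretty_label label → Spec_pretty_label label (pretty_label label)

-- ===== LEMMAS AND PROOFS =====

-- What A's fold produces: uppercase a char exactly when the previous char was a space
-- (or at the start); the carried flag is simply "the char just emitted is a space".
def pvG : Bool → List Char → List Char
  | _, [] => []
  | b, c :: cs =>
    let c' := if b then PySem.Chars.upperChar c else c
    c' :: pvG (decide (c' = ' ')) cs

-- Functional form of splitting on a single space, carrying the current word prefix.
def pvSplit : List Char → List Char → List (List Char)
  | pfx, [] => [pfx]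
  | pfx, c :: cs => if c = ' ' then pfx :: pvSplit [] cs else pvSplit (pfx ++ [c]) cs

-- Simple form of first-char capitalization.
def pvCap : List Char → List Char
  | [] => []
  | c :: cs => PySem.Chars.upperChar c :: cs

theorem pvUpperChar_ne_space {c : Char} (h : c ≠ ' ') : PySem.Chars.upperChar c ≠ ' ' := by
  intro hu
  apply h
  unfold PySem.Chars.upperChar at hu
  split at hu
  · rename_i hl
    unfold PySem.Chars.islower at hl
    simp only [Bool.and_eq_true, decide_eq_true_eq, Char.le_def] at hl
    exfalso
    have h1' : 97 ≤ c.toNat := (UInt32.le_iff_toNat_le).mp hl.1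
    have h2' : c.toNat ≤ 122 := (UInt32.le_iff_toNat_le).mp hl.2
    have hv : Nat.isValidChar (c.toNat - 32) := Or.inl (by omega)
    have hn := congrArg Char.toNat hu
    rw [Char.toNat_ofNat, if_pos hv] at hn
    have : c.toNat - 32 = 32 := hn
    omega
  · exact hu

theorem pvFoldl_eq_pvG (l : List Char) (acc : List Char) (b : Bool) :
    (l.foldl (fun (st : List Char × Bool) char =>
      let c2 := if st.2 then PySem.Chars.upperChar char else char
      let ls2 := if st.2 then false else st.2
      let ls3 := if c2 = ' ' then true else ls2
      (st.1 ++ [c2], ls3)) (acc, b)).1 = acc ++ pvG b l := by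
  induction l generalizing acc b with
  | nil => simp [pvG]
  | cons c cs ih =>
    simp only [List.foldl_cons, pvG]
    have hls : ∀ (c2 : Char), (if c2 = ' ' then true else if b then false else b)
        = decide (c2 = ' ') := by
      intro c2; cases b <;> split_ifs <;> simp_all
    rw [hls]
    rw [ih]
    simp

theorem pvSplit_ne_nil (pfx l : List Char) : pvSplit pfx l ≠ [] := by
  induction l generalizing pfx with
  | nil => simp [pvSplit]
  | cons c cs ih =>
    unfold pvSplit
    split_ifs
    · simp
    · exact ih _

theorem pvCapWord_eq_pvCap (w : List Char) : pvCapWord w = pvCap w := by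
  cases w with
  | nil => rfl
  | cons c cs =>
    unfold pvCapWord pvCap
    simp [PySem.Chars.slice, PySem.List.slice, PySem.Chars.upper]

theorem pvSplitOn_go_eq (fuel : Nat) (l cur : List Char) (hf : l.length ≤ fuel)
    (accs : List (List Char)) :
    PySem.Chars.splitOn.go [' '] fuel l cur accs = accs.reverse ++ pvSplit cur.reverse l := by
  induction fuel generalizing l cur accs with
  | zero =>
    have : l = [] := List.length_eq_zero_iff.mp (Nat.le_zero.mp hf)
    subst this
    simp [PySem.Chars.splitOn.go, pvSplit]
  | succ fuel ih =>
    cases l with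
    | nil => simp [PySem.Chars.splitOn.go, pvSplit]
    | cons c rest =>
      rw [PySem.Chars.splitOn.go]
      by_cases hc : c = ' '
      · subst hc
        rw [if_pos (by simp [List.isPrefixOf])]
        show PySem.Chars.splitOn.go [' '] fuel rest [] (cur.reverse :: accs) = _
        rw [ih rest [] (by simpa using Nat.le_of_succ_le_succ hf) (cur.reverse :: accs)]
        simp [pvSplit]
      · rw [if_neg (by simp [List.isPrefixOf]; intro h; exact absurd h.symm hc)]
        rw [ih rest (c :: cur) (by simpa using Nat.le_of_succ_le_succ hf) accs]
        simp [pvSplit, hc]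

theorem pvSplitOn_eq (l : List Char) : PySem.Chars.splitOn l [' '] = pvSplit [] l := by
  unfold PySem.Chars.splitOn
  rw [pvSplitOn_go_eq _ _ _ (by omega)]
  simp

theorem pvJoin_cap_split (l pfx : List Char) :
    PySem.Chars.join [' '] ((pvSplit pfx l).map pvCap)
      = pvCap pfx ++ pvG (decide (pfx = [])) l := by
  induction l generalizing pfx with
  | nil => simp [pvSplit, pvG, PySem.Chars.join_singleton]
  | cons c cs ih =>
    by_cases hc : c = ' '
    · subst hc
      rw [show pvSplit pfx (' ' :: cs) = pfx :: pvSplit [] cs from by simp [pvSplit]]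
      obtain ⟨x, xs, hx⟩ := List.exists_cons_of_ne_nil (pvSplit_ne_nil [] cs)
      have hjoin : PySem.Chars.join [' '] ((pfx :: pvSplit [] cs).map pvCap)
          = pvCap pfx ++ [' '] ++ PySem.Chars.join [' '] ((pvSplit [] cs).map pvCap) := by
        rw [hx]; simp only [List.map_cons]
        exact PySem.Chars.join_cons_cons _ _ _ _
      rw [hjoin, ih []]
      cases pfx with
      | nil => simp [pvG, pvCap, PySem.Chars.upperChar, PySem.Chars.islower]
      | cons p ps => simp [pvG, pvCap]
    · rw [show pvSplit pfx (c :: cs) = pvSplit (pfx ++ [c]) cs from by simp [pvSplit, hc]]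
      rw [ih (pfx ++ [c])]
      cases pfx with
      | nil =>
        simp only [List.nil_append, pvCap, pvG, decide_true, if_true, List.cons_append,
          List.nil_append]
        rw [decide_eq_false (pvUpperChar_ne_space hc)]
        simp
      | cons p ps =>
        simp [pvCap, pvG, hc]

-- ===== VERDICT (by name: the statement is the Claim_ definition above) =====
theorem pretty_label_spec : Claim_equal_pretty_label := by
  intro label _
  unfold Spec_pretty_label
  show String.ofList ((List.foldl (fun (st : List Char × Bool) char =>
      let c2 := if st.2 then PySem.Chars.upperChar char else char
      let ls2 := if st.2 then false else st.2
      let ls3 := if c2 = ' ' then true else ls2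
      (st.1 ++ [c2], ls3)) (([] : List Char), true)
      (PySem.Chars.replace label.toList ['_'] [' '])).1)
    = String.ofList (PySem.Chars.join [' ']
      ((PySem.Chars.splitOn (PySem.Chars.replace label.toList ['_'] [' ']) [' ']).map pvCapWord))
  congr 1
  rw [pvFoldl_eq_pvG]
  rw [pvSplitOn_eq, List.map_congr_left (fun w _ => pvCapWord_eq_pvCap w), pvJoin_cap_split]
  simp [pvCap]
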